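-- pv_equiv track=rewrite | github.com/JSebastian-Villa/Analisis_de_algoritmos | dyv.py | existe
-- ===== SOURCE A (Python) =====
-- def existe(arreglo, inicio, fin, x):
--     if inicio == fin:
--         if arreglo[inicio] == x:
--             return True
--         else:
--             return False
--
--     medio = (inicio + fin) // 2
--
--     izq = existe(arreglo, inicio, medio,x)
--     der = existe(arreglo, medio+ 1, fin,x)
--
--     return izq or der
-- ===== SOURCE B (Python) =====
-- def existe(arreglo, inicio, fin, x):
--     # inclusive range inicio..fin, assumed nonempty (as in A): test the first
--     # element, then walk i up to fin, OR-ing in each element's test.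
--     i = inicio
--     encontrado = arreglo[i] == x
--     while i != fin:
--         i += 1
--         encontrado = arreglo[i] == x or encontrado
--     return encontrado
-- ===== Notes on version B (the rewrite author's own statement) =====
-- stated objective: simpler
-- what changed: Replaces the binary-split recursion tree (which visits every leaf index inicio..fin) with a single iterative while-loop that tests arreglo[inicio] and then walks an index up to fin, OR-ing in each element's test.
import Mathlib
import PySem

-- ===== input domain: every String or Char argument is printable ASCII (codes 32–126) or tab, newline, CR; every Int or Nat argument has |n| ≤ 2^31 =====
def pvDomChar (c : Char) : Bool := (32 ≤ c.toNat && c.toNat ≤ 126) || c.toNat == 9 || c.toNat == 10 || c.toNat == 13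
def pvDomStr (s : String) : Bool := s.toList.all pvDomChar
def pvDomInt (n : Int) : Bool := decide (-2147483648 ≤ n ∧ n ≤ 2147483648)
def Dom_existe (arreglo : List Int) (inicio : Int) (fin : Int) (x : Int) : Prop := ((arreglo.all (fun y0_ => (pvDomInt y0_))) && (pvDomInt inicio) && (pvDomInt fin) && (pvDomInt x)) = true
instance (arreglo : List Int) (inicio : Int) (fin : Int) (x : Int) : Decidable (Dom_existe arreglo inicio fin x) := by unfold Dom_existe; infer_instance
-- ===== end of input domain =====

-- B replaces A's binary-split recursion with one flat while-loop walking an index from inicio up to fin (simpler).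

-- ===== PORT A =====
-- A's recursion diverges when inicio > fin (excluded by Pre_); the port carries fuel so it is total,
-- and the fuel (fin - inicio).toNat + 1 is sufficient wherever the Python terminates.
def existeFuel (fuel : Nat) (arreglo : List Int) (inicio : Int) (fin : Int) (x : Int) : Bool :=
  match fuel with
  | 0 => false
  | fuel + 1 =>
    if inicio = fin then
      -- arreglo[inicio]: Python indexing; none = IndexError, excluded by Pre_
      match PySem.List.pyGet? arreglo inicio with
      | some v => v = x
      | none => false
    else
      let medio := PySem.Int.floordiv (inicio + fin) 2
      let izq := existeFuel fuel arreglo inicio medio x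
      let der := existeFuel fuel arreglo (medio + 1) fin x
      izq || der

def existe (arreglo : List Int) (inicio : Int) (fin : Int) (x : Int) : Bool :=
  existeFuel ((fin - inicio).toNat + 1) arreglo inicio fin x

-- ===== PORT B =====
-- arreglo[j] == x with Python indexing (none = IndexError, excluded by Pre_)
def existeLeaf (arreglo : List Int) (x : Int) (j : Int) : Bool :=
  match PySem.List.pyGet? arreglo j with
  | some v => v = x
  | none => false

-- B's while-loop 'while i != fin: i += 1; encontrado = arreglo[i] == x or encontrado'.
-- The loop diverges in Python when i > fin (excluded by Pre_); fuel (fin - i).toNat is exact otherwise.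
def existeAltLoop (fuel : Nat) (arreglo : List Int) (i : Int) (fin : Int) (x : Int) (encontrado : Bool) : Bool :=
  match fuel with
  | 0 => encontrado
  | fuel + 1 =>
    if i ≠ fin then
      existeAltLoop fuel arreglo (i + 1) fin x (existeLeaf arreglo x (i + 1) || encontrado)
    else
      encontrado

def existe_alt (arreglo : List Int) (inicio : Int) (fin : Int) (x : Int) : Bool :=
  existeAltLoop ((fin - inicio).toNat) arreglo inicio fin x (existeLeaf arreglo x inicio)

-- ===== PRECONDITION & SPEC =====
-- Pre_ excludes inicio > fin (A's recursion never reaches its base case: RecursionError) and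
-- ranges containing an index that is out of bounds under Python indexing (A raises IndexError).
def Pre_existe (arreglo : List Int) (inicio : Int) (fin : Int) (x : Int) : Prop :=
  inicio ≤ fin ∧ -(arreglo.length : Int) ≤ inicio ∧ fin < (arreglo.length : Int)
instance (arreglo : List Int) (inicio : Int) (fin : Int) (x : Int) : Decidable (Pre_existe arreglo inicio fin x) := by unfold Pre_existe; infer_instance

def pvWitness_existe : List Int × Int × Int × Int := ([4, 7, 2], 0, 2, 7)

def Spec_existe (arreglo : List Int) (inicio : Int) (fin : Int) (x : Int) (out : Bool) : Prop := out = existe_alt arreglo inicio fin x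
instance (arreglo : List Int) (inicio : Int) (fin : Int) (x : Int) (out : Bool) : Decidable (Spec_existe arreglo inicio fin x out) := by unfold Spec_existe; infer_instance

-- ===== CLAIM (what is proved, stated in full; the proofs are below) =====
def Claim_equal_existe : Prop := ∀ (arreglo : List Int) (inicio : Int) (fin : Int) (x : Int), Dom_existe arreglo inicio fin x → Pre_existe arreglo inicio fin x → Spec_existe arreglo inicio fin x (existe arreglo inicio fin x)

-- ===== LEMMAS AND PROOFS =====

-- B's loop, run with exact fuel fin - i, ORs the leaves of i+1..fin into the accumulator.
theorem existeAltLoop_eq_any (arreglo : List Int) (x fin : Int) :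
    ∀ (fuel : Nat) (i : Int), i ≤ fin → fuel = (fin - i).toNat →
      ∀ (encontrado : Bool),
        existeAltLoop fuel arreglo i fin x encontrado =
          (encontrado || (PySem.List.pyRange (i + 1) (fin + 1) 1).any (existeLeaf arreglo x)) := by
  intro fuel
  induction fuel with
  | zero =>
    intro i hle hf encontrado
    have : i = fin := by omega
    subst this
    simp [existeAltLoop, PySem.List.pyRange_one_eq_nil (le_refl (i + 1))]
  | succ fuel ih =>
    intro i hle hf encontrado
    have hne : i ≠ fin := by omega
    have hcons : PySem.List.pyRange (i + 1) (fin + 1) 1 =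
        (i + 1) :: PySem.List.pyRange (i + 1 + 1) (fin + 1) 1 :=
      PySem.List.pyRange_one_cons (by omega)
    simp only [existeAltLoop, if_pos hne, ih (i + 1) (by omega) (by omega), hcons, List.any_cons]
    cases existeLeaf arreglo x (i + 1) <;> cases encontrado <;> simp

-- B computes the OR of the leaf tests over the whole range inicio..fin.
theorem existe_alt_eq_any (arreglo : List Int) (inicio fin x : Int) (h : inicio ≤ fin) :
    existe_alt arreglo inicio fin x =
      (PySem.List.pyRange inicio (fin + 1) 1).any (existeLeaf arreglo x) := by
  unfold existe_alt
  rw [existeAltLoop_eq_any arreglo x fin _ inicio h rfl,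
      PySem.List.pyRange_one_cons (by omega : inicio < fin + 1)]
  simp

-- With enough fuel and inicio ≤ fin, A's recursion computes exactly the same OR over inicio..fin.
theorem existeFuel_eq_any (arreglo : List Int) (x : Int) :
    ∀ (fuel : Nat) (inicio fin : Int), inicio ≤ fin → (fin - inicio).toNat < fuel →
      existeFuel fuel arreglo inicio fin x =
        (PySem.List.pyRange inicio (fin + 1) 1).any (existeLeaf arreglo x) := by
  intro fuel
  induction fuel with
  | zero => intro inicio fin _ h; omega
  | succ fuel ih =>
    intro inicio fin hle hfuel
    by_cases heq : inicio = fin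
    · subst heq
      simp [existeFuel, existeLeaf, PySem.List.pyRange_one_singleton]
    · have hlt : inicio < fin := lt_of_le_of_ne hle heq
      have hmed : PySem.Int.floordiv (inicio + fin) 2 = (inicio + fin) / 2 :=
        PySem.Int.floordiv_eq_ediv_of_pos (by omega)
      set m : Int := (inicio + fin) / 2 with hm
      have h1 : inicio ≤ m := by omega
      have h2 : m < fin := by omega
      have hiz := ih inicio m h1 (by omega)
      have hde := ih (m + 1) fin (by omega) (by omega)
      have hsplit : PySem.List.pyRange inicio (fin + 1) 1 =
          PySem.List.pyRange inicio (m + 1) 1 ++ PySem.List.pyRange (m + 1) (fin + 1) 1 :=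
        PySem.List.pyRange_one_append inicio (m + 1) (fin + 1) (by omega) (by omega)
      simp only [existeFuel, if_neg heq, hmed, hiz, hde]
      simp [hsplit, List.any_append]

-- ===== VERDICT (by name: the statement is the Claim_ definition above) =====
theorem existe_spec : Claim_equal_existe := by
  intro arreglo inicio fin x _ hpre
  unfold Spec_existe
  rw [existe_alt_eq_any arreglo inicio fin x hpre.1]
  exact existeFuel_eq_any arreglo x _ inicio fin hpre.1 (by omega)
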